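-- pv_equiv track=rewrite | github.com/fernando9017/HTA-Reimbursement-Price | app/services/uk_nice_hta.py | _best_recommendation
-- ===== SOURCE A (Python) =====
-- RECOMMENDATION_ORDER = [
--     "Recommended",
--     "Recommended with restrictions (Optimised)",
--     "Only in research",
--     "Terminated appraisal",
--     "Awaiting development",
--     "Not recommended",
-- ]
--
-- def _best_recommendation(recommendations: list[str]) -> str:
--     """Return the best (most favorable) recommendation from a list."""
--     if not recommendations:
--         return ""
--     best_idx = len(RECOMMENDATION_ORDER)
--     best_val = ""
--     for r in recommendations:
--         try:
--             idx = RECOMMENDATION_ORDER.index(r)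
--         except ValueError:
--             idx = len(RECOMMENDATION_ORDER)
--         if idx < best_idx:
--             best_idx = idx
--             best_val = r
--     return best_val
-- ===== SOURCE B (Python) =====
-- RECOMMENDATION_ORDER = [
--     "Recommended",
--     "Recommended with restrictions (Optimised)",
--     "Only in research",
--     "Terminated appraisal",
--     "Awaiting development",
--     "Not recommended",
-- ]
--
-- def _best_recommendation(recommendations: list[str]) -> str:
--     """Return the best (most favorable) recommendation from a list."""
--     for r in RECOMMENDATION_ORDER:
--         if r in recommendations:
--             return r
--     return ""
-- ===== Notes on version B (the rewrite author's own statement) =====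
-- stated objective: simpler
-- what changed: B inverts the traversal: instead of scanning the input while maintaining a best-index/best-value accumulator, it walks the fixed 6-element RECOMMENDATION_ORDER in priority order and returns the first entry present in the input ("" if none), short-circuiting.
import Mathlib
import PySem

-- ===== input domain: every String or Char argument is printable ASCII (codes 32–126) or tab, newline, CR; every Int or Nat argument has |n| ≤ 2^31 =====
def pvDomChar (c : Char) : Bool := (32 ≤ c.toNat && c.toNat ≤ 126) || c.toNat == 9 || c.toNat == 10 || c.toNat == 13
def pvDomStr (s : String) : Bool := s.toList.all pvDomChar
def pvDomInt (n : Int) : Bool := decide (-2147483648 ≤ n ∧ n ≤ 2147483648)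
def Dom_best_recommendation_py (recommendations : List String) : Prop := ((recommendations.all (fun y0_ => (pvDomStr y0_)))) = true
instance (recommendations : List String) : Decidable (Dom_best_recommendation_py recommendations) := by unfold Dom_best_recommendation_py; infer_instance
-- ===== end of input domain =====

-- B re-implements the selection by scanning the fixed priority list with a membership
-- test and short-circuiting, instead of A's best-index/best-value accumulator over the
-- input; return values are proved identical (objective: simpler).

def RECOMMENDATION_ORDER : List String :=
  [ "Recommended",
    "Recommended with restrictions (Optimised)",
    "Only in research",
    "Terminated appraisal",
    "Awaiting development",
    "Not recommended" ]

-- ===== PORT A =====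
-- loop body of A's for-loop: try RECOMMENDATION_ORDER.index(r) (ValueError → len), keep if smaller
def pvStepA (st : Int × String) (r : String) : Int × String :=
  let idx : Int :=
    match PySem.List.index? RECOMMENDATION_ORDER r with
    | some k => (k : Int)
    | none => (RECOMMENDATION_ORDER.length : Int)
  if idx < st.1 then (idx, r) else st

def best_recommendation_py (recommendations : List String) : String :=
  if recommendations = [] then ""
  else (recommendations.foldl pvStepA ((RECOMMENDATION_ORDER.length : Int), "")).2

-- ===== PORT B =====
def best_recommendation_py_alt (recommendations : List String) : String :=
  match RECOMMENDATION_ORDER.find? (fun r => recommendations.contains r) with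
  | some r => r
  | none => ""

-- ===== PRECONDITION & SPEC =====
def Spec_best_recommendation_py (recommendations : List String) (out : String) : Prop := out = best_recommendation_py_alt recommendations
instance (recommendations : List String) (out : String) : Decidable (Spec_best_recommendation_py recommendations out) := by unfold Spec_best_recommendation_py; infer_instance

-- ===== CLAIM (what is proved, stated in full; the proofs are below) =====
def Claim_equal_best_recommendation_py : Prop := ∀ (recommendations : List String), Dom_best_recommendation_py recommendations → Spec_best_recommendation_py recommendations (best_recommendation_py recommendations)

-- ===== LEMMAS AND PROOFS =====

-- the if-chain with the six membership tests abstracted as booleans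
def pvChainB (c0 c1 c2 c3 c4 c5 : Bool) (b : Int) (v : String) : String :=
  if c0 = true ∧ 0 < b then "Recommended"
  else if c1 = true ∧ 1 < b then "Recommended with restrictions (Optimised)"
  else if c2 = true ∧ 2 < b then "Only in research"
  else if c3 = true ∧ 3 < b then "Terminated appraisal"
  else if c4 = true ∧ 4 < b then "Awaiting development"
  else if c5 = true ∧ 5 < b then "Not recommended"
  else v

-- characterisation of A's accumulated value after scanning `recs` from state (b, v)
def pvChain (recs : List String) (b : Int) (v : String) : String :=
  pvChainB (recs.contains "Recommended") (recs.contains "Recommended with restrictions (Optimised)") (recs.contains "Only in research")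
    (recs.contains "Terminated appraisal") (recs.contains "Awaiting development") (recs.contains "Not recommended") b v

def pvIdx (r : String) : Int :=
  match PySem.List.index? RECOMMENDATION_ORDER r with
  | some k => (k : Int)
  | none => (RECOMMENDATION_ORDER.length : Int)

theorem pvStepA_eq (st : Int × String) (r : String) :
    pvStepA st r = if pvIdx r < st.1 then (pvIdx r, r) else st := by
  simp [pvStepA, pvIdx]

theorem pvCase (r : String) :
    r = "Recommended" ∨ r = "Recommended with restrictions (Optimised)" ∨
    r = "Only in research" ∨ r = "Terminated appraisal" ∨
    r = "Awaiting development" ∨ r = "Not recommended" ∨ r ∉ RECOMMENDATION_ORDER := by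
  by_cases h : r ∈ RECOMMENDATION_ORDER
  · simp [RECOMMENDATION_ORDER] at h
    tauto
  · tauto

theorem pvIdx_of_not_mem (r : String) (h : r ∉ RECOMMENDATION_ORDER) : pvIdx r = 6 := by
  unfold pvIdx
  rw [(PySem.List.index?_eq_none_iff _ _).mpr h]
  rfl

theorem pvChain_cons_notmem (r : String) (recs : List String) (b : Int) (v : String)
    (h : r ∉ RECOMMENDATION_ORDER) : pvChain (r :: recs) b v = pvChain recs b v := by
  simp only [RECOMMENDATION_ORDER, List.mem_cons, not_or] at h
  obtain ⟨h0, h1, h2, h3, h4, h5, -⟩ := h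
  simp [pvChain, List.contains_cons, Ne.symm h0, Ne.symm h1, Ne.symm h2, Ne.symm h3,
    Ne.symm h4, Ne.symm h5]

theorem pvHit0 (c0 c1 c2 c3 c4 c5 : Bool) (b : Int) (v : String) (hb : (0 : Int) < b) :
    pvChainB c0 c1 c2 c3 c4 c5 0 "Recommended" = pvChainB true c1 c2 c3 c4 c5 b v := by
  simp only [pvChainB]
  norm_num
  split_ifs <;> first | rfl | omega | tauto | (simp_all <;> omega) | simp_all

theorem pvMiss0 (c0 c1 c2 c3 c4 c5 : Bool) (b : Int) (v : String) (hb : ¬ ((0 : Int) < b)) :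
    pvChainB c0 c1 c2 c3 c4 c5 b v = pvChainB true c1 c2 c3 c4 c5 b v := by
  simp only [pvChainB]
  split_ifs <;> first | rfl | omega | tauto | (simp_all <;> omega) | simp_all

theorem pvHit1 (c0 c1 c2 c3 c4 c5 : Bool) (b : Int) (v : String) (hb : (1 : Int) < b) :
    pvChainB c0 c1 c2 c3 c4 c5 1 "Recommended with restrictions (Optimised)" = pvChainB c0 true c2 c3 c4 c5 b v := by
  simp only [pvChainB]
  norm_num
  split_ifs <;> first | rfl | omega | tauto | (simp_all <;> omega) | simp_all

theorem pvMiss1 (c0 c1 c2 c3 c4 c5 : Bool) (b : Int) (v : String) (hb : ¬ ((1 : Int) < b)) :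
    pvChainB c0 c1 c2 c3 c4 c5 b v = pvChainB c0 true c2 c3 c4 c5 b v := by
  simp only [pvChainB]
  split_ifs <;> first | rfl | omega | tauto | (simp_all <;> omega) | simp_all

theorem pvHit2 (c0 c1 c2 c3 c4 c5 : Bool) (b : Int) (v : String) (hb : (2 : Int) < b) :
    pvChainB c0 c1 c2 c3 c4 c5 2 "Only in research" = pvChainB c0 c1 true c3 c4 c5 b v := by
  simp only [pvChainB]
  norm_num
  split_ifs <;> first | rfl | omega | tauto | (simp_all <;> omega) | simp_all

theorem pvMiss2 (c0 c1 c2 c3 c4 c5 : Bool) (b : Int) (v : String) (hb : ¬ ((2 : Int) < b)) :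
    pvChainB c0 c1 c2 c3 c4 c5 b v = pvChainB c0 c1 true c3 c4 c5 b v := by
  simp only [pvChainB]
  split_ifs <;> first | rfl | omega | tauto | (simp_all <;> omega) | simp_all

theorem pvHit3 (c0 c1 c2 c3 c4 c5 : Bool) (b : Int) (v : String) (hb : (3 : Int) < b) :
    pvChainB c0 c1 c2 c3 c4 c5 3 "Terminated appraisal" = pvChainB c0 c1 c2 true c4 c5 b v := by
  simp only [pvChainB]
  norm_num
  split_ifs <;> first | rfl | omega | tauto | (simp_all <;> omega) | simp_all

theorem pvMiss3 (c0 c1 c2 c3 c4 c5 : Bool) (b : Int) (v : String) (hb : ¬ ((3 : Int) < b)) :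
    pvChainB c0 c1 c2 c3 c4 c5 b v = pvChainB c0 c1 c2 true c4 c5 b v := by
  simp only [pvChainB]
  split_ifs <;> first | rfl | omega | tauto | (simp_all <;> omega) | simp_all

theorem pvHit4 (c0 c1 c2 c3 c4 c5 : Bool) (b : Int) (v : String) (hb : (4 : Int) < b) :
    pvChainB c0 c1 c2 c3 c4 c5 4 "Awaiting development" = pvChainB c0 c1 c2 c3 true c5 b v := by
  simp only [pvChainB]
  norm_num
  split_ifs <;> first | rfl | omega | tauto | (simp_all <;> omega) | simp_all

theorem pvMiss4 (c0 c1 c2 c3 c4 c5 : Bool) (b : Int) (v : String) (hb : ¬ ((4 : Int) < b)) :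
    pvChainB c0 c1 c2 c3 c4 c5 b v = pvChainB c0 c1 c2 c3 true c5 b v := by
  simp only [pvChainB]
  split_ifs <;> first | rfl | omega | tauto | (simp_all <;> omega) | simp_all

theorem pvHit5 (c0 c1 c2 c3 c4 c5 : Bool) (b : Int) (v : String) (hb : (5 : Int) < b) :
    pvChainB c0 c1 c2 c3 c4 c5 5 "Not recommended" = pvChainB c0 c1 c2 c3 c4 true b v := by
  simp only [pvChainB]
  norm_num
  split_ifs <;> first | rfl | omega | tauto | (simp_all <;> omega) | simp_all

theorem pvMiss5 (c0 c1 c2 c3 c4 c5 : Bool) (b : Int) (v : String) (hb : ¬ ((5 : Int) < b)) :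
    pvChainB c0 c1 c2 c3 c4 c5 b v = pvChainB c0 c1 c2 c3 c4 true b v := by
  simp only [pvChainB]
  split_ifs <;> first | rfl | omega | tauto | (simp_all <;> omega) | simp_all

theorem pvFold_eq_chain (recs : List String) : ∀ (b : Int) (v : String), b ≤ 6 →
    (recs.foldl pvStepA (b, v)).2 = pvChain recs b v := by
  induction recs with
  | nil => intro b v _; simp [pvChain, pvChainB]
  | cons r recs ih =>
    intro b v hb
    rw [List.foldl_cons, pvStepA_eq]
    rcases pvCase r with h | h | h | h | h | h | h
    · -- r = "Recommended" (index 0)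
      subst h
      rw [show pvIdx "Recommended" = 0 from by decide]
      rw [show pvChain ("Recommended" :: recs) b v = pvChainB true (recs.contains "Recommended with restrictions (Optimised)") (recs.contains "Only in research") (recs.contains "Terminated appraisal") (recs.contains "Awaiting development") (recs.contains "Not recommended") b v
        from by simp [pvChain, List.contains_cons]]
      by_cases hlt : (0 : Int) < b
      · rw [if_pos hlt, ih _ _ (by omega)]
        exact pvHit0 _ _ _ _ _ _ b v hlt
      · rw [if_neg hlt, ih _ _ hb]
        exact pvMiss0 _ _ _ _ _ _ b v hlt
    · -- r = "Recommended with restrictions (Optimised)" (index 1)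
      subst h
      rw [show pvIdx "Recommended with restrictions (Optimised)" = 1 from by decide]
      rw [show pvChain ("Recommended with restrictions (Optimised)" :: recs) b v = pvChainB (recs.contains "Recommended") true (recs.contains "Only in research") (recs.contains "Terminated appraisal") (recs.contains "Awaiting development") (recs.contains "Not recommended") b v
        from by simp [pvChain, List.contains_cons]]
      by_cases hlt : (1 : Int) < b
      · rw [if_pos hlt, ih _ _ (by omega)]
        exact pvHit1 _ _ _ _ _ _ b v hlt
      · rw [if_neg hlt, ih _ _ hb]
        exact pvMiss1 _ _ _ _ _ _ b v hlt
    · -- r = "Only in research" (index 2)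
      subst h
      rw [show pvIdx "Only in research" = 2 from by decide]
      rw [show pvChain ("Only in research" :: recs) b v = pvChainB (recs.contains "Recommended") (recs.contains "Recommended with restrictions (Optimised)") true (recs.contains "Terminated appraisal") (recs.contains "Awaiting development") (recs.contains "Not recommended") b v
        from by simp [pvChain, List.contains_cons]]
      by_cases hlt : (2 : Int) < b
      · rw [if_pos hlt, ih _ _ (by omega)]
        exact pvHit2 _ _ _ _ _ _ b v hlt
      · rw [if_neg hlt, ih _ _ hb]
        exact pvMiss2 _ _ _ _ _ _ b v hlt
    · -- r = "Terminated appraisal" (index 3)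
      subst h
      rw [show pvIdx "Terminated appraisal" = 3 from by decide]
      rw [show pvChain ("Terminated appraisal" :: recs) b v = pvChainB (recs.contains "Recommended") (recs.contains "Recommended with restrictions (Optimised)") (recs.contains "Only in research") true (recs.contains "Awaiting development") (recs.contains "Not recommended") b v
        from by simp [pvChain, List.contains_cons]]
      by_cases hlt : (3 : Int) < b
      · rw [if_pos hlt, ih _ _ (by omega)]
        exact pvHit3 _ _ _ _ _ _ b v hlt
      · rw [if_neg hlt, ih _ _ hb]
        exact pvMiss3 _ _ _ _ _ _ b v hlt
    · -- r = "Awaiting development" (index 4)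
      subst h
      rw [show pvIdx "Awaiting development" = 4 from by decide]
      rw [show pvChain ("Awaiting development" :: recs) b v = pvChainB (recs.contains "Recommended") (recs.contains "Recommended with restrictions (Optimised)") (recs.contains "Only in research") (recs.contains "Terminated appraisal") true (recs.contains "Not recommended") b v
        from by simp [pvChain, List.contains_cons]]
      by_cases hlt : (4 : Int) < b
      · rw [if_pos hlt, ih _ _ (by omega)]
        exact pvHit4 _ _ _ _ _ _ b v hlt
      · rw [if_neg hlt, ih _ _ hb]
        exact pvMiss4 _ _ _ _ _ _ b v hlt
    · -- r = "Not recommended" (index 5)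
      subst h
      rw [show pvIdx "Not recommended" = 5 from by decide]
      rw [show pvChain ("Not recommended" :: recs) b v = pvChainB (recs.contains "Recommended") (recs.contains "Recommended with restrictions (Optimised)") (recs.contains "Only in research") (recs.contains "Terminated appraisal") (recs.contains "Awaiting development") true b v
        from by simp [pvChain, List.contains_cons]]
      by_cases hlt : (5 : Int) < b
      · rw [if_pos hlt, ih _ _ (by omega)]
        exact pvHit5 _ _ _ _ _ _ b v hlt
      · rw [if_neg hlt, ih _ _ hb]
        exact pvMiss5 _ _ _ _ _ _ b v hlt
    · -- r not in the order list: index() raises, idx = 6 ≥ b, state unchanged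
      rw [pvIdx_of_not_mem r h, if_neg (by omega), ih _ _ hb, pvChain_cons_notmem r recs b v h]

theorem pvAlt_eq_chain (recs : List String) :
    best_recommendation_py_alt recs = pvChain recs 6 "" := by
  simp only [best_recommendation_py_alt, RECOMMENDATION_ORDER, pvChain, pvChainB,
    List.find?_cons]
  norm_num
  split_ifs <;> simp_all

-- ===== VERDICT (by name: the statement is the Claim_ definition above) =====
theorem best_recommendation_py_spec : Claim_equal_best_recommendation_py := by
  intro recs _
  unfold Spec_best_recommendation_py
  rw [pvAlt_eq_chain]
  unfold best_recommendation_py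
  split_ifs with h
  · subst h; simp [pvChain, pvChainB]
  · rw [show ((RECOMMENDATION_ORDER.length : Int)) = 6 from by simp [RECOMMENDATION_ORDER]]
    exact pvFold_eq_chain recs 6 "" (by omega)
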